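-- pv_equiv track=rewrite | github.com/tomzhang97/trident | experiments/rebuttal/run_all.py | _batch_experiments
-- ===== SOURCE A (Python) =====
-- from typing import Any, Dict, List, Optional, Tuple
--
-- def _batch_experiments(
--     experiments: List[Tuple],
--     gpu_ids: List[int],
-- ) -> List[List[Tuple]]:
--     """Assign experiments to GPUs in round-robin batches.
--
--     Returns list of batches, where each batch is a list of
--     (experiment_tuple, gpu_id) pairs that can run concurrently.
--     """
--     n_gpus = len(gpu_ids)
--     if n_gpus == 0:
--         return [[(e, 0)] for e in experiments]
--
--     batches = []
--     for i in range(0, len(experiments), n_gpus):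
--         batch = []
--         for j, exp in enumerate(experiments[i:i + n_gpus]):
--             batch.append((exp, gpu_ids[j % n_gpus]))
--         batches.append(batch)
--     return batches
-- ===== SOURCE B (Python) =====
-- from typing import List, Tuple
--
-- def _batch_experiments(
--     experiments: List[Tuple],
--     gpu_ids: List[int],
-- ) -> List[List[Tuple]]:
--     """Assign experiments to GPUs in round-robin batches.
--
--     Repeatedly zip the remaining experiments against gpu_ids (zip truncates
--     to one GPU-sized batch) and chop that prefix off; no indices, no modulo.
--     """
--     n = len(gpu_ids)
--     if n == 0:
--         return [[(e, 0)] for e in experiments]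
--     batches = []
--     rest = list(experiments)
--     while rest:
--         batches.append(list(zip(rest, gpu_ids)))
--         rest = rest[n:]
--     return batches
-- ===== Notes on version B (the rewrite author's own statement) =====
-- stated objective: simpler
-- what changed: Replaces index arithmetic (range stepping, enumerate, j % n_gpus lookup) by repeatedly zipping the remaining suffix against gpu_ids, which truncates to one GPU-sized batch, then dropping that prefix; no indices or modulo at all.
import Mathlib
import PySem

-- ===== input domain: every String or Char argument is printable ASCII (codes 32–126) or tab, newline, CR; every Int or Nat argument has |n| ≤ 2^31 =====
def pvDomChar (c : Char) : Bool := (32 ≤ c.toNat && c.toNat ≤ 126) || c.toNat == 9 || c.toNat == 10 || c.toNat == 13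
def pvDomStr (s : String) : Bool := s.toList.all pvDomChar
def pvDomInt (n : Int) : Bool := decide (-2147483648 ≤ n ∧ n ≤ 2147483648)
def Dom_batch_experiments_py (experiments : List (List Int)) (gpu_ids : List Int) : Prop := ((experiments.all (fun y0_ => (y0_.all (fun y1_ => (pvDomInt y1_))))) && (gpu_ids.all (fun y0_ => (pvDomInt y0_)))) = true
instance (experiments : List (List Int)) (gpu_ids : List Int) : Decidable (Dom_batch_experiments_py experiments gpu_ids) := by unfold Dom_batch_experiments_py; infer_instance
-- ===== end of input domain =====

-- B drops A's index arithmetic (range stepping, enumerate, j % n_gpus) and instead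
-- repeatedly zips the remaining suffix against gpu_ids (zip truncates to one batch)
-- and chops that prefix off; objective: simpler.

-- ===== PORT A =====
def batch_experiments_py (experiments : List (List Int)) (gpu_ids : List Int) : List (List (List Int × Int)) :=
  let n_gpus : Int := gpu_ids.length
  if n_gpus = 0 then experiments.map (fun e => [(e, 0)])
  else
    (PySem.List.pyRange 0 (experiments.length : Int) n_gpus).foldl
      (fun batches i =>
        batches ++
          [(PySem.List.enumerate (PySem.List.slice experiments (some i) (some (i + n_gpus)))).foldl
            (fun batch je => batch ++ [(je.2, PySem.List.pyGetD gpu_ids (PySem.Int.mod je.1 n_gpus) 0)])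
            []])
      []

-- ===== PORT B =====
-- the while loop of Source B as structural recursion over `rest`; Python's
-- `rest[n:]` is `(x :: rest').drop g.length`, written `rest'.drop (g.length - 1)`
-- (equal whenever g.length ≥ 1, the only case ever reached) so Lean sees termination
def batch_experiments_py_alt_go (g : List Int) : List (List Int) → List (List (List Int × Int))
  | [] => []
  | x :: rest =>
      ((x :: rest).zip g) :: batch_experiments_py_alt_go g (rest.drop (g.length - 1))
termination_by xs => xs.length
decreasing_by simp only [List.length_drop, List.length_cons]; omega

def batch_experiments_py_alt (experiments : List (List Int)) (gpu_ids : List Int) : List (List (List Int × Int)) :=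
  let n : Int := gpu_ids.length
  if n = 0 then experiments.map (fun e => [(e, 0)])
  else batch_experiments_py_alt_go gpu_ids experiments

-- ===== PRECONDITION & SPEC =====
def Spec_batch_experiments_py (experiments : List (List Int)) (gpu_ids : List Int) (out : List (List (List Int × Int))) : Prop := out = batch_experiments_py_alt experiments gpu_ids
instance (experiments : List (List Int)) (gpu_ids : List Int) (out : List (List (List Int × Int))) : Decidable (Spec_batch_experiments_py experiments gpu_ids out) := by unfold Spec_batch_experiments_py; infer_instance

-- ===== CLAIM (what is proved, stated in full; the proofs are below) =====
def Claim_equal_batch_experiments_py : Prop := ∀ (experiments : List (List Int)) (gpu_ids : List Int), Dom_batch_experiments_py experiments gpu_ids → Spec_batch_experiments_py experiments gpu_ids (batch_experiments_py experiments gpu_ids)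

-- ===== LEMMAS AND PROOFS =====

-- the pairs (element, gpu_ids[j]) for consecutive in-chunk positions j, j+1, …
def pvPairsFrom (g : List Int) : Nat → List (List Int) → List (List Int × Int)
  | _, [] => []
  | j, e :: es => (e, PySem.List.pyGetD g (j : Int) 0) :: pvPairsFrom g (j + 1) es

-- the common reference result: experiments cut into chunks of g.length, each paired up
def pvChunks (g : List Int) : List (List Int) → List (List (List Int × Int))
  | [] => []
  | x :: rest =>
      pvPairsFrom g 0 (x :: rest.take (g.length - 1)) :: pvChunks g (rest.drop (g.length - 1))
termination_by xs => xs.length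
decreasing_by simp only [List.length_drop, List.length_cons]; omega

def pvStepA (g : List Int) (exps : List (List Int)) :
    List (List (List Int × Int)) → Int → List (List (List Int × Int)) :=
  fun batches i =>
    batches ++
      [(PySem.List.enumerate (PySem.List.slice exps (some i) (some (i + (g.length : Int))))).foldl
        (fun batch je => batch ++ [(je.2, PySem.List.pyGetD g (PySem.Int.mod je.1 (g.length : Int)) 0)])
        []]

theorem pvMod_small (g : List Int) (c : Int) (h0 : 0 ≤ c) (hc : c < (g.length : Int)) :
    PySem.Int.mod c (g.length : Int) = c := by
  rw [PySem.Int.mod_eq_emod_of_pos (lt_of_le_of_lt h0 hc)]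
  exact Int.emod_eq_of_lt h0 hc

theorem pvEnum_map_pairs (g : List Int) :
    ∀ (chunk : List (List Int)) (j : Nat), j + chunk.length ≤ g.length →
    (PySem.List.enumerate chunk (j : Int)).map
      (fun je => (je.2, PySem.List.pyGetD g (PySem.Int.mod je.1 (g.length : Int)) 0)) =
      pvPairsFrom g j chunk := by
  intro chunk
  induction chunk with
  | nil => intro j _; simp [PySem.List.enumerate_nil, pvPairsFrom]
  | cons x xs ih =>
    intro j hj
    rw [PySem.List.enumerate_cons]
    simp only [List.map_cons, pvPairsFrom]
    have hjlt : (j : Int) < (g.length : Int) := by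
      simp only [List.length_cons] at hj; exact_mod_cast by omega
    rw [pvMod_small g _ (by positivity) hjlt]
    have : ((j : Int) + 1) = ((j + 1 : Nat) : Int) := by push_cast; ring
    rw [this, ih (j + 1) (by simp at hj ⊢; omega)]

theorem pvChunks_eq (g : List Int) (hN : 0 < g.length) (ys : List (List Int)) (hy : ys ≠ []) :
    pvChunks g ys = pvPairsFrom g 0 (ys.take g.length) :: pvChunks g (ys.drop g.length) := by
  obtain ⟨y, r, rfl⟩ : ∃ a l, ys = a :: l := by
    cases ys with
    | nil => exact absurd rfl hy
    | cons a l => exact ⟨a, l, rfl⟩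
  obtain ⟨N', hN'⟩ : ∃ N', g.length = N' + 1 := ⟨g.length - 1, by omega⟩
  rw [pvChunks, hN']
  simp only [List.take_succ_cons, List.drop_succ_cons, Nat.add_sub_cancel]

theorem pvRange_pos_nil {a b s : Int} (hs : 0 < s) (h : b ≤ a) :
    PySem.List.pyRange a b s = [] := by
  rw [PySem.List.pyRange_of_pos _ _ hs]
  simp [not_lt.mpr h]

theorem pvRange_pos_cons {a b s : Int} (hs : 0 < s) (h : a < b) :
    PySem.List.pyRange a b s = a :: PySem.List.pyRange (a + s) b s := by
  rw [PySem.List.pyRange_of_pos _ _ hs, PySem.List.pyRange_of_pos _ _ hs]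
  have key : (if a < b then ((b - a + s - 1) / s).toNat else 0) =
      (if a + s < b then ((b - (a + s) + s - 1) / s).toNat else 0) + 1 := by
    rw [if_pos h]
    split_ifs with h2
    · have e : b - a + s - 1 = (b - (a + s) + s - 1) + 1 * s := by ring
      rw [e, Int.add_mul_ediv_right _ _ (ne_of_gt hs)]
      have h1 : 0 ≤ (b - (a + s) + s - 1) / s := Int.ediv_nonneg (by omega) (le_of_lt hs)
      omega
    · have e : b - a + s - 1 = (b - a - 1) + 1 * s := by ring
      rw [e, Int.add_mul_ediv_right _ _ (ne_of_gt hs)]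
      have h0 : (b - a - 1) / s = 0 := Int.ediv_eq_zero_of_lt (by omega) (by omega)
      omega
  rw [key, List.range_succ_eq_map]
  simp only [List.map_cons, Nat.cast_zero, mul_zero, add_zero, List.map_map]
  congr 1
  apply List.map_congr_left
  intro k _
  simp only [Function.comp_apply, Nat.succ_eq_add_one]
  push_cast; ring

theorem pvA_loop (g : List Int) (hN : 0 < g.length) (exps : List (List Int)) :
    ∀ (m k : Nat) (acc : List (List (List Int × Int))), exps.length - k ≤ m →
      (PySem.List.pyRange (k : Int) (exps.length : Int) (g.length : Int)).foldl
        (pvStepA g exps) acc = acc ++ pvChunks g (exps.drop k) := by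
  intro m
  induction m with
  | zero =>
    intro k acc hm
    have hk : exps.length ≤ k := by omega
    rw [pvRange_pos_nil (by exact_mod_cast hN) (by exact_mod_cast hk), List.foldl_nil,
      List.drop_eq_nil_of_le hk, pvChunks]
    simp
  | succ m ih =>
    intro k acc hm
    by_cases hk : exps.length ≤ k
    · rw [pvRange_pos_nil (by exact_mod_cast hN) (by exact_mod_cast hk), List.foldl_nil,
        List.drop_eq_nil_of_le hk]
      simp [pvChunks]
    · have hklt : k < exps.length := by omega
      rw [pvRange_pos_cons (by exact_mod_cast hN) (by exact_mod_cast hklt), List.foldl_cons]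
      have hslice : PySem.List.slice exps (some (k : Int)) (some ((k : Int) + (g.length : Int))) =
          (exps.drop k).take g.length := by
        have : (k : Int) + (g.length : Int) = ((k + g.length : Nat) : Int) := by push_cast; ring
        rw [this, PySem.List.slice_natCast]
        congr 1; omega
      have hstep : pvStepA g exps acc (k : Int) =
          acc ++ [pvPairsFrom g 0 ((exps.drop k).take g.length)] := by
        simp only [pvStepA, hslice]
        rw [PySem.List.foldl_append_singleton_eq_map, List.nil_append]
        have hpairs := pvEnum_map_pairs g ((exps.drop k).take g.length) 0
          (by simp [List.length_take])
        simp only [Nat.cast_zero] at hpairs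
        rw [hpairs]
      rw [hstep]
      have hcast : (k : Int) + (g.length : Int) = ((k + g.length : Nat) : Int) := by
        push_cast; ring
      rw [hcast, ih (k + g.length) _ (by omega),
        pvChunks_eq g hN (exps.drop k) (by simp; omega)]
      have hdd : (exps.drop k).drop g.length = exps.drop (k + g.length) := by
        rw [List.drop_drop]
      rw [hdd]
      simp [List.append_assoc]

-- B-side: the indexed pairing equals plain zip against the suffix of g
theorem pvPairs_eq_zip (g : List Int) :
    ∀ (chunk : List (List Int)) (j : Nat), j + chunk.length ≤ g.length →
      pvPairsFrom g j chunk = chunk.zip (g.drop j) := by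
  intro chunk
  induction chunk with
  | nil => intro j _; simp [pvPairsFrom]
  | cons e es ih =>
    intro j hj
    have hjlt : j < g.length := by simp only [List.length_cons] at hj; omega
    rw [pvPairsFrom, List.drop_eq_getElem_cons hjlt, List.zip_cons_cons,
      ih (j + 1) (by simp at hj ⊢; omega)]
    congr 1
    rw [PySem.List.pyGetD_natCast, List.getD_eq_getElem _ _ hjlt]

-- zip truncates: only the first g.length elements of l matter
theorem pvZip_truncate (g : List Int) :
    ∀ (l : List (List Int)), l.zip g = (l.take g.length).zip g := by
  induction g with
  | nil => intro l; simp
  | cons a as ih =>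
    intro l
    cases l with
    | nil => simp
    | cons x xs => simp [List.zip_cons_cons, ih xs]

theorem pvGo_eq_chunks (g : List Int) (hN : 0 < g.length) :
    ∀ (m : Nat) (xs : List (List Int)), xs.length ≤ m →
      batch_experiments_py_alt_go g xs = pvChunks g xs := by
  intro m
  induction m with
  | zero =>
    intro xs hm
    have : xs = [] := List.eq_nil_of_length_eq_zero (by omega)
    subst this
    rw [batch_experiments_py_alt_go, pvChunks]
  | succ m ih =>
    intro xs hm
    cases xs with
    | nil => rw [batch_experiments_py_alt_go, pvChunks]
    | cons x rest =>
      rw [batch_experiments_py_alt_go, pvChunks,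
        ih (rest.drop (g.length - 1)) (by simp at hm ⊢; omega)]
      congr 1
      have htake : (x :: rest).take g.length = x :: rest.take (g.length - 1) := by
        obtain ⟨N', hN'⟩ : ∃ N', g.length = N' + 1 := ⟨g.length - 1, by omega⟩
        rw [hN']; simp
      rw [pvZip_truncate g (x :: rest), htake,
        pvPairs_eq_zip g (x :: rest.take (g.length - 1)) 0 (by simp [List.length_take]; omega)]
      simp

-- ===== VERDICT (by name: the statement is the Claim_ definition above) =====
theorem batch_experiments_py_spec : Claim_equal_batch_experiments_py := by
  intro exps g _
  unfold Spec_batch_experiments_py batch_experiments_py batch_experiments_py_alt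
  by_cases h : (g.length : Int) = 0
  · simp [h]
  · simp only [if_neg h]
    have hN : 0 < g.length := by
      have : g.length ≠ 0 := by exact_mod_cast h
      omega
    have hA := pvA_loop g hN exps exps.length 0 [] (by omega)
    simp only [Nat.cast_zero, List.drop_zero] at hA
    have hB := pvGo_eq_chunks g hN exps.length exps le_rfl
    exact hA.trans (by rw [List.nil_append, hB])
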